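-- pv_equiv track=rewrite | github.com/gwyndurbridge/CITS3002-Blockchain-Project | miner.py | pairList
-- ===== SOURCE A (Python) =====
-- def pairList(list):
--     #go through list in steps of 2
--     pairs = []
--     for i in range(0, len(list), 2):
--         #if first of pair is last element in list it has nothing to pair with so pair with self
--         if i == len(list)-1:
--             pairs.append([list[i],list[i]])
--         else:
--             pairs.append([list[i],list[i+1]])
--     return pairs
-- ===== SOURCE B (Python) =====
-- def pairList(list):
--     evens = list[::2]
--     odds = list[1::2]
--     pairs = [[a, b] for a, b in zip(evens, odds)]
--     if len(list) % 2 == 1: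
--         pairs.append([list[-1], list[-1]])
--     return pairs
-- ===== Notes on version B (the rewrite author's own statement) =====
-- stated objective: idiomatic
-- what changed: Replaces the step-2 index loop with its in-loop last-element test by zipping the two stride slices list[::2] and list[1::2], handling the odd-length self-pair once after the zip.
import Mathlib
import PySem

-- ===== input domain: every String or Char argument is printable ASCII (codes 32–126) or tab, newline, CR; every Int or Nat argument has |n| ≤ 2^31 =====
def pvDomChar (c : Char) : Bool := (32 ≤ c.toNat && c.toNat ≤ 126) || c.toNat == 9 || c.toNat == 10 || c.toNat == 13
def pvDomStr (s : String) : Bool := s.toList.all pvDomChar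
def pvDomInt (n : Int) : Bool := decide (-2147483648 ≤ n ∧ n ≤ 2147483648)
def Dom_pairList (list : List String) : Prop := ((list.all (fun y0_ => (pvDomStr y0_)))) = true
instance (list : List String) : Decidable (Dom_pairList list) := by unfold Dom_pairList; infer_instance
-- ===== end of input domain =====

-- B pairs the two stride slices list[::2]/list[1::2] with zip and self-pairs the odd tail once after the loop, instead of A's step-2 index loop with an in-loop last-element test (idiomatic, same cost).

-- ===== PORT A =====
def pairList (list : List String) : List (List String) :=
  (PySem.List.pyRange 0 (list.length : Int) 2).foldl
    (fun pairs i =>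
      if i = (list.length : Int) - 1 then
        pairs ++ [[PySem.List.pyGetD list i "", PySem.List.pyGetD list i ""]]
      else
        pairs ++ [[PySem.List.pyGetD list i "", PySem.List.pyGetD list (i + 1) ""]])
    []

-- ===== PORT B =====
def pairList_alt (list : List String) : List (List String) :=
  let evens := (PySem.List.slice? list none none 2).getD []
  let odds := (PySem.List.slice? list (some 1) none 2).getD []
  let pairs := (evens.zip odds).map (fun p => [p.1, p.2])
  if (list.length : Int) % 2 = 1 then
    pairs ++ [[PySem.List.pyGetD list (-1) "", PySem.List.pyGetD list (-1) ""]]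
  else
    pairs

-- ===== PRECONDITION & SPEC =====
def Spec_pairList (list : List String) (out : List (List String)) : Prop := out = pairList_alt list
instance (list : List String) (out : List (List String)) : Decidable (Spec_pairList list out) := by unfold Spec_pairList; infer_instance

-- ===== CLAIM (what is proved, stated in full; the proofs are below) =====
def Claim_equal_pairList : Prop := ∀ (list : List String), Dom_pairList list → Spec_pairList list (pairList list)

-- ===== LEMMAS AND PROOFS =====

-- A's loop, written as a map over the step-2 index range
theorem pairList_eq_map (l : List String) :
    pairList l = (List.range (((l.length : Int) + 1) / 2).toNat).map
      (fun k : Nat => if ((2 * k : Nat) : Int) = (l.length : Int) - 1 then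
          [l.getD (2 * k) "", l.getD (2 * k) ""]
        else
          [l.getD (2 * k) "", l.getD (2 * k + 1) ""]) := by
  unfold pairList
  rw [PySem.List.pyRange_of_pos 0 (l.length : Int) (by norm_num)]
  have hc : (if (0:Int) < (l.length : Int) then (((l.length : Int) - 0 + 2 - 1) / 2).toNat else 0)
      = (((l.length : Int) + 1) / 2).toNat := by
    split <;> omega
  rw [hc, List.foldl_map]
  have hf : (fun (pairs : List (List String)) (k : Nat) =>
      if (0 + 2 * (k:Int)) = (l.length : Int) - 1 then
        pairs ++ [[PySem.List.pyGetD l (0 + 2 * (k:Int)) "", PySem.List.pyGetD l (0 + 2 * (k:Int)) ""]]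
      else
        pairs ++ [[PySem.List.pyGetD l (0 + 2 * (k:Int)) "", PySem.List.pyGetD l ((0 + 2 * (k:Int)) + 1) ""]])
      = (fun pairs k => pairs ++ [if ((2 * k : Nat) : Int) = (l.length : Int) - 1 then
          [l.getD (2 * k) "", l.getD (2 * k) ""]
        else
          [l.getD (2 * k) "", l.getD (2 * k + 1) ""]]) := by
    funext pairs k
    have h1 : (0 + 2 * (k:Int)) = ((2 * k : Nat) : Int) := by push_cast; ring
    rw [h1]
    have h2 : ((2 * k : Nat) : Int) + 1 = ((2 * k + 1 : Nat) : Int) := by push_cast; ring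
    rw [h2]
    simp only [PySem.List.pyGetD_natCast]
    split <;> rfl
  rw [hf, PySem.List.foldl_append_singleton_eq_map]
  simp

-- B's evens slice list[::2] as a map
theorem evens_eq (l : List String) :
    (PySem.List.slice? l none none 2).getD [] =
      (List.range (((l.length : Int) + 1) / 2).toNat).map (fun k : Nat => l.getD (2 * k) "") := by
  simp only [PySem.List.slice?, PySem.List.sliceIndices]
  norm_num
  have hc : (if 0 < l.length then (((l.length : Int) + 2 - 1) / 2).toNat else 0)
      = (((l.length : Int) + 1) / 2).toNat := by split <;> omega
  rw [hc]
  rw [List.filterMap_congr (g := fun k : Nat => (some ∘ fun k : Nat => l[2 * k]?.getD "") k)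
    (by
      intro k hk
      simp only [List.mem_range] at hk
      have h2k : 2 * k < l.length := by omega
      have ht : ((2 * (k:Int)).toNat) = 2 * k := by omega
      rw [ht]
      simp [List.getElem?_eq_getElem h2k])]
  exact congrFun List.filterMap_eq_map _

-- B's odds slice list[1::2] as a map
theorem odds_eq (l : List String) :
    (PySem.List.slice? l (some 1) none 2).getD [] =
      (List.range (l.length / 2)).map (fun k : Nat => l.getD (2 * k + 1) "") := by
  simp only [PySem.List.slice?, PySem.List.sliceIndices]
  norm_num
  have hc : (if 1 < l.length then (((l.length : Int) - min 1 (l.length : Int) + 2 - 1) / 2).toNat else 0)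
      = l.length / 2 := by split <;> omega
  rw [hc]
  rw [List.filterMap_congr (g := fun k : Nat => (some ∘ fun k : Nat => l[2 * k + 1]?.getD "") k)
    (by
      intro k hk
      simp only [List.mem_range] at hk
      have h2k : 2 * k + 1 < l.length := by omega
      have ht : ((min 1 (l.length : Int) + 2 * (k:Int)).toNat) = 2 * k + 1 := by omega
      rw [ht]
      simp [List.getElem?_eq_getElem h2k])]
  exact congrFun List.filterMap_eq_map _

theorem zip_map_range {α β : Type} (f : Nat → α) (g : Nat → β) (m₁ m₂ : Nat) :
    ((List.range m₁).map f).zip ((List.range m₂).map g) =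
      (List.range (min m₁ m₂)).map (fun k => (f k, g k)) := by
  apply List.ext_getElem
  · simp
  · intro i h1 h2
    simp [List.getElem_zip]

-- B, written as the same map plus the odd tail
theorem alt_eq_map (l : List String) :
    pairList_alt l =
      (List.range (l.length / 2)).map (fun k : Nat => [l.getD (2 * k) "", l.getD (2 * k + 1) ""])
      ++ (if l.length % 2 = 1 then [[l.getD (l.length - 1) "", l.getD (l.length - 1) ""]] else []) := by
  unfold pairList_alt
  have hmin : min ((((l.length : Int) + 1) / 2).toNat) (l.length / 2) = l.length / 2 := by omega
  simp only [evens_eq, odds_eq, zip_map_range, hmin, List.map_map]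
  by_cases hodd : l.length % 2 = 1
  · have hne : l ≠ [] := by intro h; simp [h] at hodd
    have hcond : ((l.length : Int) % 2 = 1) := by omega
    rw [if_pos hcond, if_pos hodd, PySem.List.pyGetD_neg_one l "" hne]
    have hlast : l.getLast hne = l.getD (l.length - 1) "" := by
      rw [List.getLast_eq_getElem, List.getD_eq_getElem l "" (by
        have := List.length_pos_iff.mpr hne; omega)]
    rw [hlast]
    rfl
  · have hcond : ¬ ((l.length : Int) % 2 = 1) := by omega
    rw [if_neg hcond, if_neg hodd, List.append_nil]
    rfl

theorem main_eq (l : List String) : pairList l = pairList_alt l := by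
  rw [pairList_eq_map, alt_eq_map]
  by_cases hodd : l.length % 2 = 1
  · have hm : (((l.length : Int) + 1) / 2).toNat = l.length / 2 + 1 := by omega
    rw [hm, List.range_succ, List.map_append]
    congr 1
    · apply List.map_congr_left
      intro k hk
      simp only [List.mem_range] at hk
      rw [if_neg (by omega)]
    · rw [List.map_singleton, if_pos (by omega)]
      have he : 2 * (l.length / 2) = l.length - 1 := by omega
      rw [he, if_pos hodd]
  · have hm : (((l.length : Int) + 1) / 2).toNat = l.length / 2 := by omega
    rw [hm, if_neg hodd, List.append_nil]
    apply List.map_congr_left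
    intro k hk
    simp only [List.mem_range] at hk
    rw [if_neg (by omega)]

-- ===== VERDICT (by name: the statement is the Claim_ definition above) =====
theorem pairList_spec : Claim_equal_pairList := by
  intro l _
  unfold Spec_pairList
  exact main_eq l
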